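-- pv_equiv track=rewrite | github.com/YHWriteCode/EconRAGent | kg_agent/skills/command_planner.py | _normalize_bootstrap_package_name
-- ===== SOURCE A (Python) =====
-- def _normalize_bootstrap_package_name(token: str) -> str:
--     normalized = str(token or "").strip().lower()
--     if not normalized:
--         return ""
--     normalized = normalized.lstrip()
--     for delimiter in ("[", "<", ">", "=", "!", "~"):
--         if delimiter in normalized:
--             normalized = normalized.split(delimiter, 1)[0].strip()
--     return normalized
-- ===== SOURCE B (Python) =====
-- def _normalize_bootstrap_package_name(token: str) -> str:
--     normalized = str(token or "").strip().lower()
--     if not normalized: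
--         return ""
--     kept = []
--     for ch in normalized:
--         if ch in "[<>=!~":
--             break
--         kept.append(ch)
--     return "".join(kept).strip()
-- ===== Notes on version B (the rewrite author's own statement) =====
-- stated objective: simpler
-- what changed: A's loop over the six-delimiter tuple with repeated split(d,1)[0].strip() passes (plus a redundant lstrip) is replaced by a single left-to-right scan of the string that stops at the first delimiter character, followed by one final strip.
import Mathlib
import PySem

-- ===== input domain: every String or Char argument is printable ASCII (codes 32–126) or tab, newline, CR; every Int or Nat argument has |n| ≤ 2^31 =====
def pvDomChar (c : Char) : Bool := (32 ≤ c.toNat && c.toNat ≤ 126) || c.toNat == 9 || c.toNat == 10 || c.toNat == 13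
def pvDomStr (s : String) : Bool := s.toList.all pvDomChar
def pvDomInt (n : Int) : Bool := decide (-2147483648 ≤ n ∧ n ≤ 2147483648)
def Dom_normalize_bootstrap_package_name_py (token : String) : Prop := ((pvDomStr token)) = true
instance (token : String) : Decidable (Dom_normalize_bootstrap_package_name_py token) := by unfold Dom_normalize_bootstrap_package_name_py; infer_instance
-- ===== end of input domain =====

-- B replaces A's loop over the delimiter tuple with repeated split/strip passes by a single
-- left-to-right scan of the string that stops at the first delimiter character (objective: simpler).

-- ===== PORT A =====
-- the tuple ("[", "<", ">", "=", "!", "~") of A's for-loop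
def pvDelimsA : List Char := ['[', '<', '>', '=', '!', '~']

-- one iteration of A's for-body: if delimiter in s: s = s.split(delimiter, 1)[0].strip()
def pvStepA (s : List Char) (d : Char) : List Char :=
  if PySem.Chars.isIn [d] s then
    PySem.Chars.strip ((((PySem.Chars.splitMax? s [d] 1).getD []).headD []))
  else s

def pvNormA (cs : List Char) : List Char :=
  let n := PySem.Chars.lower (PySem.Chars.strip cs)
  if n.isEmpty then []
  else pvDelimsA.foldl pvStepA (PySem.Chars.lstrip n)

def normalize_bootstrap_package_name_py (token : String) : String :=
  let t := if token == "" then "" else token   -- str(token or "")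
  String.ofList (pvNormA t.toList)

-- ===== PORT B =====
def pvDelimsB : List Char := "[<>=!~".toList

-- B's loop: for ch in normalized: if ch in "[<>=!~": break; kept.append(ch)
def pvScan : List Char → List Char
  | [] => []
  | c :: rest => if PySem.Chars.isIn [c] pvDelimsB then [] else c :: pvScan rest

def pvNormB (cs : List Char) : List Char :=
  let n := PySem.Chars.lower (PySem.Chars.strip cs)
  if n.isEmpty then []
  else PySem.Chars.strip (pvScan n)

def normalize_bootstrap_package_name_py_alt (token : String) : String :=
  let t := if token == "" then "" else token   -- str(token or "")
  String.ofList (pvNormB t.toList)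

-- ===== PRECONDITION & SPEC =====
def Spec_normalize_bootstrap_package_name_py (token : String) (out : String) : Prop := out = normalize_bootstrap_package_name_py_alt token
instance (token : String) (out : String) : Decidable (Spec_normalize_bootstrap_package_name_py token out) := by unfold Spec_normalize_bootstrap_package_name_py; infer_instance

-- ===== CLAIM (what is proved, stated in full; the proofs are below) =====
def Claim_equal_normalize_bootstrap_package_name_py : Prop := ∀ (token : String), Dom_normalize_bootstrap_package_name_py token → Spec_normalize_bootstrap_package_name_py token (normalize_bootstrap_package_name_py token)

-- ===== LEMMAS AND PROOFS =====

-- membership facts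
lemma pv_infix_singleton (c : Char) (l : List Char) : [c] <:+: l ↔ c ∈ l := by
  constructor
  · intro h; exact h.subset (List.mem_singleton_self c)
  · intro h
    obtain ⟨s, t, rfl⟩ := List.append_of_mem h
    exact ⟨s, t, by simp⟩

lemma pv_isIn_singleton (c : Char) (l : List Char) :
    PySem.Chars.isIn [c] l = l.contains c := by
  by_cases h : c ∈ l
  · have : PySem.Chars.find l [c] ≠ -1 := by
      rw [ne_eq, PySem.Chars.find_eq_neg_one_iff, pv_infix_singleton]
      simpa using h
    simp [PySem.Chars.isIn, this, h]
  · have : PySem.Chars.find l [c] = -1 := by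
      rw [PySem.Chars.find_eq_neg_one_iff, pv_infix_singleton]
      simpa using h
    simp [PySem.Chars.isIn, this, h]

-- splitOnMax.go with maxsplit exhausted returns the remainder as one piece
lemma pv_go_zero (sep : List Char) : ∀ (fuel : Nat) (l cur : List Char) (acc : List (List Char)),
    PySem.Chars.splitOnMax.go sep fuel 0 l cur acc = ((cur.reverse ++ l) :: acc).reverse := by
  intro fuel l cur acc
  cases fuel with
  | zero => rw [PySem.Chars.splitOnMax.go]
  | succ fuel =>
    cases l with
    | nil => rw [PySem.Chars.splitOnMax.go]; simp; omega
    | cons c rest => rw [PySem.Chars.splitOnMax.go]; simp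

-- splitOnMax.go with maxsplit = 1 and a one-character separator
lemma pv_go_one (d : Char) : ∀ (fuel : Nat) (l cur : List Char) (acc : List (List Char)), l.length ≤ fuel →
    PySem.Chars.splitOnMax.go [d] fuel 1 l cur acc =
      if d ∈ l then
        (l.drop ((l.takeWhile (fun c => !(c == d))).length + 1)
          :: (cur.reverse ++ l.takeWhile (fun c => !(c == d))) :: acc).reverse
      else ((cur.reverse ++ l) :: acc).reverse := by
  intro fuel
  induction fuel with
  | zero =>
    intro l cur acc h
    have : l = [] := List.length_eq_zero_iff.mp (Nat.le_zero.mp h)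
    subst this
    rw [PySem.Chars.splitOnMax.go]; simp
  | succ fuel ih =>
    intro l cur acc h
    cases l with
    | nil => rw [PySem.Chars.splitOnMax.go]; simp; omega
    | cons c rest =>
      rw [PySem.Chars.splitOnMax.go]
      by_cases hcd : c = d
      · subst hcd
        simp only [List.isPrefixOf, BEq.rfl, Bool.true_and, if_true]
        rw [pv_go_zero]
        simp
      · have hne : ¬ ([d].isPrefixOf (c :: rest) = true) := by
          simp [List.isPrefixOf]
          exact fun hdc => absurd hdc.symm hcd
        simp only [if_neg (by omega : ¬ (1 : Nat) = 0), if_neg hne]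
        rw [ih rest (c :: cur) acc (by simpa using Nat.le_of_succ_le_succ h)]
        have hmem : (d ∈ c :: rest) = (d ∈ rest) := by
          simp [List.mem_cons, eq_comm]
          intro hdc; exact absurd hdc.symm hcd
        have htw : (c :: rest).takeWhile (fun c' => !(c' == d)) =
            c :: rest.takeWhile (fun c' => !(c' == d)) := by
          simp [hcd]
        by_cases hd : d ∈ rest
        · rw [if_pos hd, if_pos (by simp [hd])]
          simp [htw, List.drop_succ_cons]
        · rw [if_neg hd, if_neg (by simp [hd]; intro hdc; exact absurd hdc.symm hcd)]
          simp

-- A's loop body in closed form: cut before the first d, then strip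
lemma pv_stepA_eq (s : List Char) (d : Char) :
    pvStepA s d = if d ∈ s then
        PySem.Chars.strip (s.takeWhile (fun c => !(c == d))) else s := by
  unfold pvStepA
  rw [pv_isIn_singleton]
  by_cases h : d ∈ s
  · rw [if_pos (by simpa using h), if_pos h]
    have : PySem.Chars.splitMax? s [d] 1 = some (PySem.Chars.splitOnMax s [d] 1) := by
      simp [PySem.Chars.splitMax?]
    rw [this]
    unfold PySem.Chars.splitOnMax
    rw [if_neg (by omega)]
    simp only [Int.toNat_one]
    rw [pv_go_one d (s.length + 1) s [] [] (by omega)]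
    rw [if_pos h]
    simp
  · rw [if_neg (by simpa using h), if_neg h]

-- space/strip toolkit
lemma pv_dropWhile_head_false {p : Char → Bool} :
    ∀ (l : List Char) (a : Char) (t : List Char), List.dropWhile p l = a :: t → p a = false := by
  intro l
  induction l with
  | nil => intro a t h; simp at h
  | cons c rest ih =>
    intro a t h
    rw [List.dropWhile_cons] at h
    by_cases hc : p c
    · rw [if_pos hc] at h; exact ih a t h
    · rw [if_neg hc] at h
      cases h; simpa using hc

lemma pv_dropWhile_idem {p : Char → Bool} (l : List Char) :
    List.dropWhile p (List.dropWhile p l) = List.dropWhile p l := by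
  cases h : List.dropWhile p l with
  | nil => simp
  | cons a t =>
    have := pv_dropWhile_head_false l a t h
    simp [this]

lemma pv_lstrip_lstrip (l : List Char) :
    PySem.Chars.lstrip (PySem.Chars.lstrip l) = PySem.Chars.lstrip l := by
  simp [PySem.Chars.lstrip, pv_dropWhile_idem]

lemma pv_rstrip_rstrip (l : List Char) :
    PySem.Chars.rstrip (PySem.Chars.rstrip l) = PySem.Chars.rstrip l := by
  simp [PySem.Chars.rstrip, pv_dropWhile_idem]

lemma pv_lstrip_rstrip_of_lstripped (l : List Char) (h : PySem.Chars.lstrip l = l) :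
    PySem.Chars.lstrip (PySem.Chars.rstrip l) = PySem.Chars.rstrip l := by
  cases hr : PySem.Chars.rstrip l with
  | nil => simp [PySem.Chars.lstrip]
  | cons a t =>
    -- rstrip l is a prefix of l, so its head is l's head, which is non-space
    have hpre : PySem.Chars.rstrip l <+: l := by
      simp only [PySem.Chars.rstrip]
      have : List.dropWhile PySem.Chars.isspace l.reverse <:+ l.reverse :=
        List.dropWhile_suffix _
      obtain ⟨s, hs⟩ := this
      exact ⟨s.reverse, by rw [← List.reverse_append, hs, List.reverse_reverse]⟩
    obtain ⟨u, hu⟩ := hpre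
    rw [hr] at hu
    have hhead : PySem.Chars.isspace a = false := by
      apply pv_dropWhile_head_false (p := PySem.Chars.isspace) l a (t ++ u)
      rw [show List.dropWhile PySem.Chars.isspace l = l from h, ← hu]
      simp
    simp [PySem.Chars.lstrip, hhead]

lemma pv_lstrip_strip (l : List Char) :
    PySem.Chars.lstrip (PySem.Chars.strip l) = PySem.Chars.strip l := by
  simp only [PySem.Chars.strip]
  exact pv_lstrip_rstrip_of_lstripped _ (pv_lstrip_lstrip l)

lemma pv_strip_strip (l : List Char) :
    PySem.Chars.strip (PySem.Chars.strip l) = PySem.Chars.strip l := by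
  conv_lhs => rw [PySem.Chars.strip, pv_lstrip_strip]
  rw [PySem.Chars.strip, pv_rstrip_rstrip]

lemma pv_lstrip_sp_append {sp : List Char} (hsp : ∀ c ∈ sp, PySem.Chars.isspace c = true)
    (x : List Char) : PySem.Chars.lstrip (sp ++ x) = PySem.Chars.lstrip x := by
  simp only [PySem.Chars.lstrip, List.dropWhile_append]
  rw [List.dropWhile_eq_nil_iff.mpr (by intro c hc; exact hsp c hc)]
  simp

lemma pv_rstrip_append_sp {sq : List Char} (hsq : ∀ c ∈ sq, PySem.Chars.isspace c = true)
    (x : List Char) : PySem.Chars.rstrip (x ++ sq) = PySem.Chars.rstrip x := by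
  simp only [PySem.Chars.rstrip, List.reverse_append, List.dropWhile_append]
  rw [List.dropWhile_eq_nil_iff.mpr (by intro c hc; exact hsq c (by simpa using hc))]
  simp

lemma pv_strip_sp_append {sp : List Char} (hsp : ∀ c ∈ sp, PySem.Chars.isspace c = true)
    (x : List Char) : PySem.Chars.strip (sp ++ x) = PySem.Chars.strip x := by
  simp only [PySem.Chars.strip, pv_lstrip_sp_append hsp]

lemma pv_strip_append_sp {sq : List Char} (hsq : ∀ c ∈ sq, PySem.Chars.isspace c = true)
    (x : List Char) : PySem.Chars.strip (x ++ sq) = PySem.Chars.strip x := by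
  simp only [PySem.Chars.strip, PySem.Chars.lstrip, List.dropWhile_append]
  by_cases h : (List.dropWhile PySem.Chars.isspace x).isEmpty
  · rw [if_pos h]
    rw [List.dropWhile_eq_nil_iff.mpr (by intro c hc; exact hsq c hc)]
    rw [List.isEmpty_iff.mp h]
  · rw [if_neg h]
    exact pv_rstrip_append_sp hsq _

lemma pv_takeWhile_sp_append {p : Char → Bool} (hp : ∀ c, PySem.Chars.isspace c = true → p c = true)
    {sp : List Char} (hsp : ∀ c ∈ sp, PySem.Chars.isspace c = true) (x : List Char) :
    List.takeWhile p (sp ++ x) = sp ++ List.takeWhile p x := by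
  rw [List.takeWhile_append]
  rw [List.takeWhile_eq_self_iff.mpr (fun c hc => hp c (hsp c hc))]
  simp

-- the key strip/takeWhile exchange: stripping first, cutting, then stripping again
-- is the same as cutting first then stripping (p holds on all whitespace)
lemma pv_strip_takeWhile_strip {p : Char → Bool}
    (hp : ∀ c, PySem.Chars.isspace c = true → p c = true) (t : List Char) :
    PySem.Chars.strip (List.takeWhile p (PySem.Chars.strip t)) =
      PySem.Chars.strip (List.takeWhile p t) := by
  -- t = sp ++ u with sp its leading spaces
  have hsplit : List.takeWhile PySem.Chars.isspace t ++ List.dropWhile PySem.Chars.isspace t = t :=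
    List.takeWhile_append_dropWhile
  set sp := List.takeWhile PySem.Chars.isspace t with hsp_def
  set u := List.dropWhile PySem.Chars.isspace t with hu_def
  have hsp : ∀ c ∈ sp, PySem.Chars.isspace c = true := fun c hc => List.mem_takeWhile_imp hc
  have hrhs : PySem.Chars.strip (List.takeWhile p t) = PySem.Chars.strip (List.takeWhile p u) := by
    conv_lhs => rw [← hsplit]
    rw [pv_takeWhile_sp_append hp hsp, pv_strip_sp_append hsp]
  rw [hrhs]
  have hstript : PySem.Chars.strip t = PySem.Chars.rstrip u := by
    rw [PySem.Chars.strip]; rfl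
  rw [hstript]
  -- u = v ++ sq with v = rstrip u and sq its trailing spaces
  have husplit : u = PySem.Chars.rstrip u ++ (List.takeWhile PySem.Chars.isspace u.reverse).reverse := by
    simp only [PySem.Chars.rstrip]
    rw [← List.reverse_append, List.takeWhile_append_dropWhile, List.reverse_reverse]
  set v := PySem.Chars.rstrip u with hv_def
  set sq := (List.takeWhile PySem.Chars.isspace u.reverse).reverse with hsq_def
  have hsq : ∀ c ∈ sq, PySem.Chars.isspace c = true := by
    intro c hc
    exact List.mem_takeWhile_imp (by simpa [hsq_def] using hc)
  rw [husplit, List.takeWhile_append]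
  by_cases hlen : (List.takeWhile p v).length = v.length
  · rw [if_pos hlen]
    have hv : List.takeWhile p v = v := (List.takeWhile_prefix p).eq_of_length hlen
    rw [List.takeWhile_eq_self_iff.mpr (fun c hc => hp c (hsq c hc))]
    rw [pv_strip_append_sp hsq, hv]
  · rw [if_neg hlen]

lemma pv_mem_strip_iff {c : Char} (hc : PySem.Chars.isspace c = false) (t : List Char) :
    c ∈ PySem.Chars.strip t ↔ c ∈ t := by
  have hsplit : List.takeWhile PySem.Chars.isspace t ++ List.dropWhile PySem.Chars.isspace t = t :=
    List.takeWhile_append_dropWhile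
  set u := List.dropWhile PySem.Chars.isspace t with hu_def
  have hstript : PySem.Chars.strip t = PySem.Chars.rstrip u := by rw [PySem.Chars.strip]; rfl
  have husplit : u = PySem.Chars.rstrip u ++ (List.takeWhile PySem.Chars.isspace u.reverse).reverse := by
    simp only [PySem.Chars.rstrip]
    rw [← List.reverse_append, List.takeWhile_append_dropWhile, List.reverse_reverse]
  constructor
  · intro h
    rw [← hsplit]
    refine List.mem_append_right _ ?_
    rw [husplit]
    exact List.mem_append_left _ (by simpa [hstript] using h)
  · intro h
    rw [← hsplit] at h
    rcases List.mem_append.mp h with h1 | h2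
    · exact absurd (List.mem_takeWhile_imp h1) (by simp [hc])
    · rw [husplit] at h2
      rcases List.mem_append.mp h2 with h3 | h4
      · simpa [hstript] using h3
      · exact absurd (List.mem_takeWhile_imp (by simpa using h4)) (by simp [hc])

lemma pv_takeWhile_congr_mem {p q : Char → Bool} :
    ∀ (l : List Char), (∀ c ∈ l, p c = q c) → List.takeWhile p l = List.takeWhile q l := by
  intro l
  induction l with
  | nil => intro _; rfl
  | cons a t ih =>
    intro h
    rw [List.takeWhile_cons, List.takeWhile_cons, h a (by simp),
      ih (fun c hc => h c (by simp [hc]))]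

-- A's whole for-loop in closed form
lemma pv_foldA (ds : List Char) (hds : ∀ d ∈ ds, PySem.Chars.isspace d = false) :
    ∀ w : List Char, List.foldl pvStepA (PySem.Chars.strip w) ds =
      PySem.Chars.strip (w.takeWhile (fun c => !(ds.contains c))) := by
  induction ds with
  | nil =>
    intro w
    rw [List.takeWhile_eq_self_iff.mpr (by intro c _; simp)]
    rfl
  | cons d ds ih =>
    intro w
    have hd : PySem.Chars.isspace d = false := hds d (by simp)
    have hds' : ∀ e ∈ ds, PySem.Chars.isspace e = false := fun e he => hds e (by simp [he])
    have hp : ∀ c, PySem.Chars.isspace c = true → (!(c == d)) = true := by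
      intro c hcs
      simp only [Bool.not_eq_eq_eq_not, Bool.not_true, beq_eq_false_iff_ne, ne_eq]
      intro h; rw [h] at hcs; rw [hcs] at hd; exact absurd hd (by simp)
    rw [List.foldl_cons, pv_stepA_eq]
    by_cases hmem : d ∈ w
    · rw [if_pos ((pv_mem_strip_iff hd w).mpr hmem)]
      rw [pv_strip_takeWhile_strip hp w]
      rw [ih hds' (w.takeWhile (fun c => !(c == d)))]
      rw [List.takeWhile_takeWhile]
      apply congrArg
      apply pv_takeWhile_congr_mem
      intro c _
      simp [Bool.and_comm]
    · rw [if_neg (fun hm => hmem ((pv_mem_strip_iff hd w).mp hm))]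
      rw [ih hds' w]
      apply congrArg
      apply pv_takeWhile_congr_mem
      intro c hc
      have hne : ¬ c = d := by rintro rfl; exact hmem hc
      simp [hne]

lemma pv_scan_eq (n : List Char) :
    pvScan n = n.takeWhile (fun c => !(pvDelimsB.contains c)) := by
  induction n with
  | nil => rfl
  | cons c rest ih =>
    rw [List.takeWhile_cons]
    unfold pvScan
    rw [pv_isIn_singleton, ih]
    cases hcb : pvDelimsB.contains c
    · rfl
    · rfl

-- lowering never creates whitespace
lemma pv_isspace_lowerChar (c : Char) :
    PySem.Chars.isspace (PySem.Chars.lowerChar c) = PySem.Chars.isspace c := by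
  unfold PySem.Chars.lowerChar
  by_cases h : PySem.Chars.isupper c
  · rw [if_pos h]
    have hbounds : 65 ≤ c.toNat ∧ c.toNat ≤ 90 := by
      simpa [PySem.Chars.isupper, Char.le_def] using h
    have hval : (c.toNat + 32).isValidChar := Or.inl (by omega)
    have htoNat : (Char.ofNat (c.toNat + 32)).toNat = c.toNat + 32 := by
      rw [Char.toNat_ofNat, if_pos hval]
    have hl : PySem.Chars.isspace (Char.ofNat (c.toNat + 32)) = false := by
      simp only [PySem.Chars.isspace, htoNat]
      simp only [Bool.or_eq_false_iff, Bool.and_eq_false_iff, decide_eq_false_iff_not]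
      omega
    have hr : PySem.Chars.isspace c = false := by
      simp only [PySem.Chars.isspace]
      simp only [Bool.or_eq_false_iff, Bool.and_eq_false_iff, decide_eq_false_iff_not]
      omega
    rw [hl, hr]
  · rw [if_neg h]

lemma pv_dropWhile_congr {p q : Char → Bool} (h : ∀ c, p c = q c) :
    ∀ (l : List Char), List.dropWhile p l = List.dropWhile q l := by
  intro l
  induction l with
  | nil => rfl
  | cons a t ih => rw [List.dropWhile_cons, List.dropWhile_cons, h a, ih]

lemma pv_lower_strip (y : List Char) :
    PySem.Chars.strip (PySem.Chars.lower y) = PySem.Chars.lower (PySem.Chars.strip y) := by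
  have hmap : ∀ z : List Char,
      List.dropWhile PySem.Chars.isspace (List.map PySem.Chars.lowerChar z) =
        List.map PySem.Chars.lowerChar (List.dropWhile PySem.Chars.isspace z) := by
    intro z
    rw [List.dropWhile_map]
    apply congrArg
    apply pv_dropWhile_congr
    intro c
    simp [Function.comp, pv_isspace_lowerChar]
  simp only [PySem.Chars.strip, PySem.Chars.lower, PySem.Chars.lstrip, PySem.Chars.rstrip]
  rw [hmap, ← List.map_reverse, hmap, List.map_reverse]

-- the two normalizers agree on char lists
lemma pv_norm_eq (cs : List Char) : pvNormA cs = pvNormB cs := by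
  unfold pvNormA pvNormB
  simp only []
  set n := PySem.Chars.lower (PySem.Chars.strip cs) with hn_def
  by_cases hE : n.isEmpty
  · rw [if_pos hE, if_pos hE]
  · rw [if_neg hE, if_neg hE]
    have hstripn : PySem.Chars.strip n = n := by
      rw [hn_def, pv_lower_strip, pv_strip_strip]
    have hlstripn : PySem.Chars.lstrip n = n := by
      conv_lhs => rw [← hstripn]
      rw [pv_lstrip_strip, hstripn]
    have hds : ∀ d ∈ pvDelimsA, PySem.Chars.isspace d = false := by
      intro d hd
      fin_cases hd <;> rfl
    rw [hlstripn]
    conv_lhs => rw [← hstripn]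
    rw [pv_foldA pvDelimsA hds n]
    rw [pv_scan_eq]
    have hBA : pvDelimsB = pvDelimsA := rfl
    rw [hBA]

-- ===== VERDICT (by name: the statement is the Claim_ definition above) =====
theorem normalize_bootstrap_package_name_py_spec : Claim_equal_normalize_bootstrap_package_name_py := by
  intro token _
  unfold Spec_normalize_bootstrap_package_name_py
  unfold normalize_bootstrap_package_name_py normalize_bootstrap_package_name_py_alt
  simp only [pv_norm_eq]
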